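-- pv_equiv track=rewrite | github.com/utselmeg/symptomate | backend/expert_system.py | cal_coverage
-- ===== SOURCE A (Python) =====
-- def cal_coverage(clicked_symptoms, idx_and_othersymptoms):
--     """
--     finding correct diagnosis based on all symptoms given
--     """
--     clicked_symptoms = set(clicked_symptoms)
--     final_idx = []
--     max_prop = 0
--     for idx in idx_and_othersymptoms:
--         othersymptoms = idx_and_othersymptoms[idx]
--         prop = len(set(othersymptoms).intersection(
--             clicked_symptoms))  # /len(set(othersymptoms))
--         if prop == max_prop:
--             final_idx.append(idx)
--         elif prop > max_prop:
--             max_prop = prop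
--             final_idx = [idx]
--     return final_idx
-- ===== SOURCE B (Python) =====
-- def cal_coverage(clicked_symptoms, idx_and_othersymptoms):
--     """
--     finding correct diagnosis based on all symptoms given
--     (two-pass: build the overlap table, then select the argmax keys)
--     """
--     clicked = set(clicked_symptoms)
--     props = {idx: len(set(others) & clicked)
--              for idx, others in idx_and_othersymptoms.items()}
--     m = max(props.values(), default=0)
--     return [idx for idx, p in props.items() if p == m]
-- ===== Notes on version B (the rewrite author's own statement) =====
-- stated objective: alternative
-- what changed: A's single-pass running-max-with-reset loop is replaced by a two-pass build-table-then-select decomposition: compute every overlap count into an insertion-ordered table, take the global max (default 0), then select the keys attaining it.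
import Mathlib
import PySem

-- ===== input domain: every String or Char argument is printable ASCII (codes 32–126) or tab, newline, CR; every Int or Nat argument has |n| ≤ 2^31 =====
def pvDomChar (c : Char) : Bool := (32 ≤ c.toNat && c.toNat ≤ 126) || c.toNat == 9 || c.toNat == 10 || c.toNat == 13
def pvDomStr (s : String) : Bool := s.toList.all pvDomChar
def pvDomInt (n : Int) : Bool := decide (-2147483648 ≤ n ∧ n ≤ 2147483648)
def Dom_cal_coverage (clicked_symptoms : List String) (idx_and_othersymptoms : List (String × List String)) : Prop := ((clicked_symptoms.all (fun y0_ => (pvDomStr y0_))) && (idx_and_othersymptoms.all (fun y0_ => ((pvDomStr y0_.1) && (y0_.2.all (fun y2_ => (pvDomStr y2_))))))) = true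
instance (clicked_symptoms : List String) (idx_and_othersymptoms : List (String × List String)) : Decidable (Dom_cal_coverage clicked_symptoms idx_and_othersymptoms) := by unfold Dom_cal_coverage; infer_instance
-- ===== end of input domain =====

-- B replaces A's single-pass running-max-with-reset loop by a two-pass build-table-then-select
-- decomposition (objective: alternative decomposition, same cost); return value only is compared.

-- len(set(othersymptoms).intersection(clicked)) — the overlap count both Pythons compute
def pvOverlap (clicked : PySem.Set String) (others : List String) : Int :=
  ((PySem.Set.inter (PySem.Set.ofList others) clicked).length : Int)

-- ===== PORT A =====
def cal_coverage (clicked_symptoms : List String) (idx_and_othersymptoms : List (String × List String)) : List String :=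
  let clicked := PySem.Set.ofList clicked_symptoms
  let d := PySem.Dict.ofList idx_and_othersymptoms
  -- for idx in idx_and_othersymptoms: …  (running max with reset; d[idx] ported as getD —
  -- idx ranges over d.keys, so Python's KeyError branch is unreachable)
  (d.keys.foldl (fun (st : List String × Int) idx =>
      let othersymptoms := d.getD idx []
      let prop := pvOverlap clicked othersymptoms
      if prop = st.2 then (st.1 ++ [idx], st.2)
      else if st.2 < prop then ([idx], prop)
      else st) ([], 0)).1

-- ===== PORT B =====
def cal_coverage_alt (clicked_symptoms : List String) (idx_and_othersymptoms : List (String × List String)) : List String :=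
  let clicked := PySem.Set.ofList clicked_symptoms
  -- props = {idx: len(set(others) & clicked) for idx, others in d.items()}
  let props := (PySem.Dict.ofList idx_and_othersymptoms).items.map
      (fun p => (p.1, pvOverlap clicked p.2))
  -- m = max(props.values(), default=0)
  let m := PySem.List.maxD (props.map (·.2)) (fun x => x) 0
  -- [idx for idx, p in props.items() if p == m]
  (props.filter (fun q => q.2 == m)).map (·.1)

-- ===== PRECONDITION & SPEC =====
def Spec_cal_coverage (clicked_symptoms : List String) (idx_and_othersymptoms : List (String × List String)) (out : List String) : Prop := out = cal_coverage_alt clicked_symptoms idx_and_othersymptoms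
instance (clicked_symptoms : List String) (idx_and_othersymptoms : List (String × List String)) (out : List String) : Decidable (Spec_cal_coverage clicked_symptoms idx_and_othersymptoms out) := by unfold Spec_cal_coverage; infer_instance

-- ===== CLAIM (what is proved, stated in full; the proofs are below) =====
def Claim_equal_cal_coverage : Prop := ∀ (clicked_symptoms : List String) (idx_and_othersymptoms : List (String × List String)), Dom_cal_coverage clicked_symptoms idx_and_othersymptoms → Spec_cal_coverage clicked_symptoms idx_and_othersymptoms (cal_coverage clicked_symptoms idx_and_othersymptoms)

-- ===== LEMMAS AND PROOFS =====

-- A's running-max-with-reset loop computes: the global max M of f over the list, together with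
-- the keys whose f-value equals M (prefixed by acc only when the max never moved above m).
lemma foldA {α : Type} (key : α → String) (f : α → Int) :
    ∀ (l : List α) (acc : List String) (m : Int),
      l.foldl (fun (st : List String × Int) x =>
          if f x = st.2 then (st.1 ++ [key x], st.2)
          else if st.2 < f x then ([key x], f x)
          else st) (acc, m)
      = ((if (l.map f).foldl max m = m then acc else []) ++
          (l.filter (fun x => f x == (l.map f).foldl max m)).map key,
         (l.map f).foldl max m) := by
  intro l
  induction l with
  | nil => simp
  | cons x t ih =>
    intro acc m
    simp only [List.foldl_cons, List.map_cons, List.filter_cons]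
    by_cases h1 : f x = m
    · simp only [if_pos h1]
      rw [ih (acc ++ [key x]) m]
      have hmax : max m (f x) = m := by omega
      simp only [hmax]
      by_cases h2 : (t.map f).foldl max m = m
      · simp [h2, h1]
      · have h3 : ¬ f x = (t.map f).foldl max m := by omega
        simp [h2, beq_iff_eq, h3]
    · simp only [if_neg h1]
      by_cases hlt : m < f x
      · simp only [if_pos hlt]
        rw [ih [key x] (f x)]
        have hmax : max m (f x) = f x := by omega
        simp only [hmax]
        have hle : f x ≤ (t.map f).foldl max (f x) := (PySem.List.le_foldl_max _ _).1
        have hne : ¬ (t.map f).foldl max (f x) = m := by omega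
        simp only [if_neg hne]
        by_cases h3 : (t.map f).foldl max (f x) = f x
        · simp [h3]
        · have h4 : ¬ f x = (t.map f).foldl max (f x) := fun h => h3 h.symm
          simp [h3, beq_iff_eq, h4]
      · simp only [if_neg hlt]
        rw [ih acc m]
        have hmax : max m (f x) = m := by omega
        simp only [hmax]
        have hle : m ≤ (t.map f).foldl max m := (PySem.List.le_foldl_max _ _).1
        have h4 : ¬ f x = (t.map f).foldl max m := by omega
        simp [beq_iff_eq, h4]

-- max(xs, default=0) equals the running max from 0 when every element is nonnegative
lemma maxD_id_zero_of_nonneg (l : List Int) (h : ∀ y ∈ l, 0 ≤ y) :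
    PySem.List.maxD l (fun x => x) 0 = l.foldl max 0 := by
  cases l with
  | nil => rfl
  | cons x t =>
    have hx : 0 ≤ x := h x (by simp)
    have hmax : max 0 x = x := by omega
    simp [PySem.List.maxD, PySem.List.max?_id_cons, hmax]

-- ===== VERDICT (by name: the statement is the Claim_ definition above) =====
theorem cal_coverage_spec : Claim_equal_cal_coverage := by
  intro cs d0 _
  unfold Spec_cal_coverage cal_coverage cal_coverage_alt
  dsimp only
  rw [PySem.Dict.items_eq_map_keys _ (PySem.Dict.nodup_keys_ofList d0) ([] : List String)]
  rw [foldA (fun k => k) (fun k => pvOverlap (PySem.Set.ofList cs) ((PySem.Dict.ofList d0).getD k [])) _ [] 0]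
  simp only [List.map_map, Function.comp_def]
  rw [maxD_id_zero_of_nonneg]
  · simp [List.filter_map, Function.comp_def]
  · intro y hy
    rcases List.mem_map.mp hy with ⟨p, _, rfl⟩
    simp [pvOverlap]
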